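-- pv_equiv track=rewrite | github.com/tluanga-dev/rental-manager-backend | src/domain/entities/id_manager.py | _increment_letters
-- ===== SOURCE A (Python) =====
-- def _increment_letters(letters: str) -> str:
--     """
--     Increments letter sequence using right-to-left carryover
--     Examples:
--     'A' -> 'B'
--     'Z' -> 'AA'
--     'AZ' -> 'BA'
--     'ZZZ' -> 'AAAA'
--     """
--     if not letters:  # Handle empty case
--         return "A"
--
--     chars = list(letters.upper())
--     # Iterate from right to left
--     for i in reversed(range(len(chars))):
--         if chars[i] != "Z":
--             chars[i] = chr(ord(chars[i]) + 1)  # Increment character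
--             return "".join(chars)
--         chars[i] = "A"  # Reset to A and carry over
--
--     # All characters were Z - add new character
--     return "A" * (len(chars) + 1)
-- ===== SOURCE B (Python) =====
-- def _increment_letters(letters: str) -> str:
--     # Recursive decomposition: peel the last character; a non-"Z" last char is
--     # bumped, a "Z" means increment the (shorter) prefix and append the reset "A".
--     # bump("") == "A" covers both the empty input and the all-"Z" overflow.
--     def bump(s: str) -> str:
--         if not s:
--             return "A"
--         if s[-1] != "Z":
--             return s[:-1] + chr(ord(s[-1]) + 1)
--         return bump(s[:-1]) + "A"
--
--     return bump(letters.upper())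
-- ===== Notes on version B (the rewrite author's own statement) =====
-- stated objective: simpler
-- what changed: Replaces A's iterative right-to-left index loop mutating a char list (plus a separate all-carry branch) by a pure structural recursion that peels the last character, whose empty base case covers both the empty input and the full-carry overflow.
import Mathlib
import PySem

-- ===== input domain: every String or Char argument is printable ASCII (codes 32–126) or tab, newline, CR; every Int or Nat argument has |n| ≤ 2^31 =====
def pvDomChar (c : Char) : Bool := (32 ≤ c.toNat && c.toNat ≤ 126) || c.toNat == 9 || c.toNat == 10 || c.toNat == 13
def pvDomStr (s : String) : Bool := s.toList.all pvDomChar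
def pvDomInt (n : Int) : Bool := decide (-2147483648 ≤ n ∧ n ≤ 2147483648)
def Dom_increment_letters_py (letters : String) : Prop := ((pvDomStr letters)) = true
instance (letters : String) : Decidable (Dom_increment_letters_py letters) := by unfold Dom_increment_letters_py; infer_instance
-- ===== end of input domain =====

-- B replaces A's iterative carry loop over a mutable char list by a structural
-- recursion peeling the last character, whose empty base case subsumes the
-- empty-input and all-'Z' branches: simpler decomposition.

-- ===== PORT A =====
-- chr(ord(c) + 1); domain chars are ≤ 126 so the code point stays valid
def pvSuccChar (c : Char) : Char := Char.ofNat (c.toNat + 1)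

-- A's `for i in reversed(range(len(chars)))` loop, run over the REVERSED char list:
-- none = the loop fell through (all chars were 'Z'), some l = the early return's list (reversed)
def pvALoop : List Char → Option (List Char)
  | [] => none
  | c :: rest =>
      if c ≠ 'Z' then some (pvSuccChar c :: rest)
      else (pvALoop rest).map (fun l => 'A' :: l)

def increment_letters_py (letters : String) : String :=
  if letters.toList = [] then "A"
  else
    let chars := (PySem.Str.upper letters).toList
    match pvALoop chars.reverse with
    | some l => String.ofList l.reverse
    | none => String.ofList (List.replicate (chars.length + 1) 'A')

-- ===== PORT B =====
-- Source B's recursive `bump`: s[-1] = getLastD, s[:-1] = dropLast (exact on nonempty s)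
def pvBump (s : List Char) : List Char :=
  if h : s = [] then ['A']
  else if s.getLastD 'A' ≠ 'Z' then s.dropLast ++ [pvSuccChar (s.getLastD 'A')]
  else pvBump s.dropLast ++ ['A']
termination_by s.length
decreasing_by
  have := List.length_pos_of_ne_nil h
  simp [List.length_dropLast]; omega

def increment_letters_py_alt (letters : String) : String :=
  String.ofList (pvBump (PySem.Str.upper letters).toList)

-- ===== PRECONDITION & SPEC =====
def Spec_increment_letters_py (letters : String) (out : String) : Prop := out = increment_letters_py_alt letters
instance (letters : String) (out : String) : Decidable (Spec_increment_letters_py letters out) := by unfold Spec_increment_letters_py; infer_instance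

-- ===== CLAIM (what is proved, stated in full; the proofs are below) =====
def Claim_equal_increment_letters_py : Prop := ∀ (letters : String), Dom_increment_letters_py letters → Spec_increment_letters_py letters (increment_letters_py letters)

-- ===== LEMMAS AND PROOFS =====

-- core: B's recursion on the list equals A's loop on the reversed list
theorem pvBump_eq_loop (r : List Char) :
    pvBump r.reverse
    = (match pvALoop r with
       | some l => l.reverse
       | none => List.replicate (r.length + 1) 'A') := by
  induction r with
  | nil => simp [pvBump, pvALoop]
  | cons c rest ih =>
    rw [List.reverse_cons, pvBump]
    have hne : rest.reverse ++ [c] ≠ ([] : List Char) := by simp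
    rw [dif_neg hne]
    rw [List.getLastD_concat, List.dropLast_concat]
    by_cases hc : c = 'Z'
    · subst hc
      simp only [ne_eq, not_true_eq_false, if_false, ih, pvALoop]
      cases hA : pvALoop rest with
      | none =>
        simp only [hA, Option.map_none]
        rw [← List.replicate_succ' (n := rest.length + 1)]
        simp
      | some l =>
        simp [hA]
    · have hstep : pvALoop (c :: rest) = some (pvSuccChar c :: rest) := by
        simp [pvALoop, hc]
      simp [hc, hstep]

-- ===== VERDICT (by name: the statement is the Claim_ definition above) =====
theorem increment_letters_py_spec : Claim_equal_increment_letters_py := by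
  intro letters _
  unfold Spec_increment_letters_py increment_letters_py increment_letters_py_alt
  have hlen : (PySem.Str.upper letters).toList.length = letters.toList.length := by
    simp [PySem.Str.toList_upper, PySem.Chars.upper]
  by_cases h : letters.toList = []
  · have hs : (PySem.Str.upper letters).toList = [] := by
      have := hlen; rw [h] at this; exact List.eq_nil_of_length_eq_zero this
    rw [if_pos h, hs, pvBump]
    decide
  · rw [if_neg h]
    have core := pvBump_eq_loop ((PySem.Str.upper letters).toList.reverse)
    rw [List.reverse_reverse, List.length_reverse] at core
    simp only [PySem.Str.toList_upper] at core ⊢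
    rw [core]
    cases hA : pvALoop (PySem.Chars.upper letters.toList).reverse <;> simp [hA]
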